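-- pv_equiv track=rewrite | github.com/yushengding/codejam_2022 | R1/test1.py | solve
-- ===== SOURCE A (Python) =====
-- def solve(line):
--   s = []
--   for c in line.strip():
--     if s and s[-1][0] == c:
--       s[-1][1] += 1
--     else:
--       s.append([c, 1])
--   ans = ''
--   for (c0, count0), (c1, count1) in zip(s, s[1:]):
--     if c0 < c1:
--       ans += c0 * (count0 * 2)
--     else:
--       ans += c0 * count0
--   ans += s[-1][0] * s[-1][1]
--
--   return ans
-- ===== SOURCE B (Python) =====
-- def solve(line):
--     # One right-to-left pass with O(1) state instead of building a run-length
--     # encoding and zipping adjacent groups.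
--     t = line.strip()
--     pieces = []
--     prev = None   # character at the next position to the right
--     nxt = None    # nearest character to the right that differs from t[i]
--     for c in reversed(t):
--         if prev is not None and prev != c:
--             nxt = prev
--         pieces.append(c + c if nxt is not None and nxt > c else c)
--         prev = c
--     pieces.reverse()
--     return ''.join(pieces)
-- ===== Notes on version B (the rewrite author's own statement) =====
-- stated objective: alternative
-- what changed: Replaces A's run-length-encoding pass plus a zip over adjacent groups by a single right-to-left scan that carries the nearest distinct character to the right in O(1) state; Pre_ excludes lines that strip to the empty string, on which A's s[-1] raises IndexError while B naturally returns ''.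
import Mathlib
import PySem

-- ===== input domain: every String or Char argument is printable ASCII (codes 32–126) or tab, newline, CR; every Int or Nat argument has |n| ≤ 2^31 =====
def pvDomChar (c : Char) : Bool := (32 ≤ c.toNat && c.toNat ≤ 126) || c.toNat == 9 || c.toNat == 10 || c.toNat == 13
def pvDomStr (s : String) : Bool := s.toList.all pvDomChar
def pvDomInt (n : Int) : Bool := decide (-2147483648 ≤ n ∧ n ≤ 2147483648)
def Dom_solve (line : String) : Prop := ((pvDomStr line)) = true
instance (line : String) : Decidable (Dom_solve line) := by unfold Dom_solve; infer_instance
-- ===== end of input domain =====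

-- B replaces A's run-length pass + zip over adjacent groups by one right-to-left scan
-- carrying the nearest distinct character to the right (objective: alternative).

-- ===== PORT A =====
-- 'if s and s[-1][0] == c: s[-1][1] += 1 else: s.append([c, 1])'
def pvStepA (s : List (Char × Int)) (c : Char) : List (Char × Int) :=
  match s.getLast? with
  | some (c0, n) => if c0 = c then s.dropLast ++ [(c0, n + 1)] else s ++ [(c, 1)]
  | none => [(c, 1)]

def solve (line : String) : String :=
  let t := (PySem.Str.strip line).toList
  let s := t.foldl pvStepA []
  let ans := (s.zip (PySem.List.slice s (some 1) none)).foldl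
    (fun ans p =>
      if p.1.1 < p.2.1 then ans ++ List.replicate (p.1.2 * 2).toNat p.1.1
      else ans ++ List.replicate p.1.2.toNat p.1.1) []
  match PySem.List.pyGet? s (-1) with
  | some (c, n) => String.mk (ans ++ List.replicate n.toNat c)
  | none => ""   -- Python raises IndexError here (s[-1] on []); excluded by Pre_solve

-- ===== PORT B =====
-- state = (pieces, prev, nxt) as in Source B's loop over reversed(t)
def pvStepB (st : List (List Char) × Option Char × Option Char) (c : Char) :
    List (List Char) × Option Char × Option Char :=
  let nxt := match st.2.1 with
    | some p => if p ≠ c then some p else st.2.2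
    | none => st.2.2
  let piece := match nxt with
    | some d => if c < d then [c, c] else [c]
    | none => [c]
  (st.1 ++ [piece], some c, nxt)

def solve_alt (line : String) : String :=
  let t := (PySem.Str.strip line).toList
  let st := t.reverse.foldl pvStepB ([], none, none)
  String.mk st.1.reverse.flatten

-- ===== PRECONDITION & SPEC =====
-- Pre_ excludes exactly the lines that are empty after strip(): there A's 's[-1]' raises IndexError (B returns '').
def Pre_solve (line : String) : Prop := PySem.Str.strip line ≠ ""
instance (line : String) : Decidable (Pre_solve line) := by unfold Pre_solve; infer_instance
def pvWitness_solve : String := "aab"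

def Spec_solve (line : String) (out : String) : Prop := out = solve_alt line
instance (line : String) (out : String) : Decidable (Spec_solve line out) := by unfold Spec_solve; infer_instance

-- ===== CLAIM (what is proved, stated in full; the proofs are below) =====
def Claim_equal_solve : Prop := ∀ (line : String), Dom_solve line → Pre_solve line → Spec_solve line (solve line)

-- ===== LEMMAS AND PROOFS =====

-- next distinct character after a position holding c, in the remainder t
def pvNd (t : List Char) (c : Char) : Option Char :=
  match t with
  | [] => none
  | d :: r => if d = c then pvNd r c else some d

-- the characters contributed by position (c, count n) when the next distinct char is o
def pvChunk (c : Char) (n : Int) (o : Option Char) : List Char :=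
  match o with
  | some d => if c < d then List.replicate (n * 2).toNat c else List.replicate n.toNat c
  | none => List.replicate n.toNat c

def pvPieces (t : List Char) : List (List Char) :=
  match t with
  | [] => []
  | c :: r => pvChunk c 1 (pvNd r c) :: pvPieces r

def pvRender (s : List (Char × Int)) : List Char :=
  ((s.zip s.tail).flatMap (fun p => pvChunk p.1.1 p.1.2 (some p.2.1))) ++
    (match s.getLast? with
     | some (c, n) => List.replicate n.toNat c
     | none => [])

lemma pvStepA_ne_nil (s : List (Char × Int)) (c : Char) : pvStepA s c ≠ [] := by
  unfold pvStepA
  match s.getLast? with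
  | some (c0, n) => dsimp; split <;> simp
  | none => simp

lemma pvFoldl_prefix (t : List Char) (pre acc : List (Char × Int)) (h : acc ≠ []) :
    t.foldl pvStepA (pre ++ acc) = pre ++ t.foldl pvStepA acc := by
  induction t generalizing acc with
  | nil => simp
  | cons e t ih =>
    have hstep : pvStepA (pre ++ acc) e = pre ++ pvStepA acc e := by
      unfold pvStepA
      rw [List.getLast?_append_of_ne_nil _ h]
      match hacc : acc.getLast? with
      | some (c0, n) =>
        dsimp; split
        · rw [List.dropLast_append_of_ne_nil h, List.append_assoc]
        · rw [List.append_assoc]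
      | none => simp [List.getLast?_eq_none_iff.mp hacc] at h
    simp only [List.foldl_cons, hstep, ih _ (pvStepA_ne_nil acc e)]

def pvF1 (c : Char) (n : Int) (t : List Char) : List (Char × Int) :=
  t.foldl pvStepA [(c, n)]

lemma pvF1_cons (c : Char) (n : Int) (d : Char) (t : List Char) :
    pvF1 c n (d :: t) = if d = c then pvF1 c (n + 1) t else (c, n) :: pvF1 d 1 t := by
  unfold pvF1
  simp only [List.foldl_cons]
  by_cases h : d = c
  · subst h
    simp [pvStepA]
  · rw [if_neg h]
    have hne : c ≠ d := fun hh => h hh.symm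
    simp only [pvStepA, List.getLast?_singleton, if_neg hne]
    have := pvFoldl_prefix t [(c, n)] [(d, 1)] (by simp)
    simpa using this

lemma pvF1_shape (t : List Char) (c : Char) (n : Int) :
    ∃ m rest, pvF1 c n t = (c, m) :: rest := by
  induction t generalizing n with
  | nil => exact ⟨n, [], rfl⟩
  | cons d t ih =>
    rw [pvF1_cons]
    by_cases h : d = c
    · simpa [h] using ih (n + 1)
    · exact ⟨n, pvF1 d 1 t, by simp [h]⟩

lemma pvRender_singleton (c : Char) (n : Int) :
    pvRender [(c, n)] = List.replicate n.toNat c := by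
  simp [pvRender]

lemma pvRender_cons (c : Char) (n : Int) (d : Char) (m : Int) (rest : List (Char × Int)) :
    pvRender ((c, n) :: (d, m) :: rest) =
      pvChunk c n (some d) ++ pvRender ((d, m) :: rest) := by
  simp [pvRender]

lemma pvChunk_add_one (c : Char) (n : Int) (hn : 0 ≤ n) (o : Option Char) :
    pvChunk c (n + 1) o = pvChunk c n o ++ pvChunk c 1 o := by
  have h1 : (n + 1).toNat = n.toNat + 1 := by omega
  have h2 : ((n + 1) * 2).toNat = (n * 2).toNat + 2 := by omega
  cases o with
  | none => simp [pvChunk, h1, List.replicate_add]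
  | some d =>
    simp only [pvChunk]
    split_ifs <;> simp [h1, h2, List.replicate_add]

lemma pvNd_self (t : List Char) (c : Char) : pvNd (c :: t) c = pvNd t c := by
  simp [pvNd]

lemma pvMain (t : List Char) (c : Char) (n : Int) (hn : 0 ≤ n) :
    pvRender (pvF1 c n t) = pvChunk c n (pvNd t c) ++ (pvPieces t).flatten := by
  induction t generalizing c n with
  | nil =>
    simp [pvF1, pvRender_singleton, pvPieces, pvNd, pvChunk]
  | cons d t ih =>
    rw [pvF1_cons]
    by_cases h : d = c
    · subst h
      rw [if_pos rfl, ih d (n + 1) (by omega), pvNd_self]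
      simp only [pvPieces, List.flatten_cons]
      rw [pvChunk_add_one _ _ hn, List.append_assoc]
    · rw [if_neg h]
      obtain ⟨m, rest, hsh⟩ := pvF1_shape t d 1
      rw [hsh, pvRender_cons, ← hsh, ih d 1 (by omega)]
      have hnd : pvNd (d :: t) c = some d := by simp [pvNd, h]
      simp only [pvPieces, List.flatten_cons, hnd]

-- B-side characterization
def pvNdHead (t : List Char) : Option Char :=
  match t with
  | [] => none
  | c :: r => pvNd r c

lemma pvB_foldr (t : List Char) :
    t.foldr (fun c st => pvStepB st c) ([], none, none) =
      ((pvPieces t).reverse, t.head?, pvNdHead t) := by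
  induction t with
  | nil => rfl
  | cons c rest ih =>
    simp only [List.foldr_cons, ih]
    match rest with
    | [] => simp [pvStepB, pvNdHead, pvPieces, pvNd, pvChunk]
    | p :: r =>
      have hnxt : (if p ≠ c then some p else pvNd r p) = pvNd (p :: r) c := by
        by_cases h : p = c
        · subst h; simp [pvNd]
        · simp [pvNd, h]
      have hpiece : ∀ o : Option Char, (match o with
          | some d => if c < d then [c, c] else [c]
          | none => [c]) = pvChunk c 1 o := by
        intro o
        match o with
        | none => rfl
        | some d => simp only [pvChunk]; split <;> rfl
      simp only [pvStepB, pvNdHead, List.head?_cons, hnxt, hpiece]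
      simp [pvPieces]

lemma pvSolve_eq_render (line : String) :
    solve line = String.mk (pvRender ((PySem.Str.strip line).toList.foldl pvStepA [])) := by
  unfold solve
  dsimp only
  rw [PySem.List.slice_from_one]
  match hs : (PySem.Str.strip line).toList.foldl pvStepA [] with
  | [] =>
    simp only [pvRender, PySem.List.pyGet?]
    rfl
  | (c0, n0) :: s' =>
    rw [PySem.List.pyGet?_neg_one]
    have hfold : ∀ (l : List ((Char × Int) × (Char × Int))) (a : List Char),
        l.foldl (fun ans p =>
          if p.1.1 < p.2.1 then ans ++ List.replicate (p.1.2 * 2).toNat p.1.1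
          else ans ++ List.replicate p.1.2.toNat p.1.1) a
          = a ++ l.flatMap (fun p => pvChunk p.1.1 p.1.2 (some p.2.1)) := by
      intro l
      induction l with
      | nil => simp
      | cons x xs ihx =>
        intro a
        simp only [List.foldl_cons, ihx, List.flatMap_cons]
        split
        · rename_i hlt
          simp [pvChunk, hlt, List.append_assoc]
        · rename_i hlt
          simp [pvChunk, hlt, List.append_assoc]
    rw [hfold]
    match hl : ((c0, n0) :: s').getLast? with
    | none => simp at hl
    | some (c, n) =>
      simp [pvRender, hl]

lemma pvSolveAlt_eq (line : String) :
    solve_alt line = String.mk ((pvPieces (PySem.Str.strip line).toList).flatten) := by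
  unfold solve_alt
  dsimp only
  rw [List.foldl_reverse]
  rw [pvB_foldr]
  simp

-- ===== VERDICT (by name: the statement is the Claim_ definition above) =====
theorem solve_spec : Claim_equal_solve := by
  unfold Claim_equal_solve
  intro line _ _
  unfold Spec_solve
  rw [pvSolve_eq_render, pvSolveAlt_eq]
  match ht : (PySem.Str.strip line).toList with
  | [] => rfl
  | c :: t =>
    have : (c :: t).foldl pvStepA [] = pvF1 c 1 t := by
      simp [pvF1, pvStepA]
    rw [this, pvMain t c 1 (by omega)]
    simp [pvPieces, List.flatten_cons]
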